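-- pv_equiv track=rewrite | github.com/DevilCoders/Yandex | tools/releaser/src/cli/utils.py | get_deploy_comment
-- ===== SOURCE A (Python) =====
-- import itertools
--
-- NO_DEPLOY_COMMENT = 'no'
--
-- def _get_changelog_until_version(changelog_records, prev_version, all_if_not_found=False):
--     result = []
--     for version, changelog_record in changelog_records:
--         if version == prev_version:
--             return result  # found the `upto`, return the previous collected
--         result.append((version, changelog_record))
--     if all_if_not_found:
--         return result  # return the entire source
--     return []  # `prev_version` not found, return nothing.
--
-- def get_deploy_comment(
--         deploy_comment_format, changelog_records, from_version=None, new_version=None,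
--         default_version='<unknown>', default_changelog='<null>'):
--     if deploy_comment_format == NO_DEPLOY_COMMENT:
--         return None
--
--     changelog_records = iter(changelog_records)
--
--     # Note: assuming the `changelog_records` are from newest to the oldest.
--
--     # Make a fallback record for cases when `version` / `from_version` were not found.
--     try:
--         top_record = next(changelog_records)
--     except StopIteration:
--         return deploy_comment_format.format(
--             version=default_version, changelog=default_changelog)
--     # else:
--     # Put it back:
--     changelog_records = itertools.chain([top_record], changelog_records)
--
--     if new_version:  # skip until 'target' version is found
--         new_changelog_record = next(
--             (changelog_record
--              for version, changelog_record in changelog_records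
--              if version == new_version),
--             None)
--         if new_changelog_record is None:
--             # `new_version` was not found,
--             # `changelog_records` is now empty,
--             # fallback to old behaviour.
--             changelog_records = iter([top_record])
--         else:
--             # Tricky point: `changelog_records` is now read up to and including
--             # the `new_version` record.
--             # put it back (still need new_version's changelog):
--             changelog_records = itertools.chain(
--                 [(new_version, new_changelog_record)],
--                 changelog_records)
--
--     # Second fallback:
--     relevant_records = [next(changelog_records)]
--     if from_version:
--         # Additionally append records up to `from_version` (not including),
--         # but only if `from_version` is actually found.
--         relevant_records.extend(_get_changelog_until_version(changelog_records, from_version))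
--
--     relevant_records_processed = []
--     for idx, (version, changelog_record) in enumerate(relevant_records):
--         # # Убираем две последние строки с датой и выпускающим версию.
--         # # ... может выреать лишнего.
--         # # TODO: Требуется более приличное решение.
--         # # https://github.yandex-team.ru/tools/releaser/issues/131
--         # changelog_record = changelog_record.rsplit('\n', 3)[0]
--         if idx > 0:
--             changelog_record = '{}:\n{}'.format(version, changelog_record)
--         relevant_records_processed.append((version, changelog_record))
--
--     relevant_records = relevant_records_processed
--
--     version = None
--     if relevant_records:
--         version = relevant_records[0][0]
--     version = version or default_version
--     changelog = '\n\n'.join(changelog_record for version, changelog_record in relevant_records)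
--     changelog = changelog or default_changelog
--
--     return deploy_comment_format.format(
--         version=version,
--         changelog=changelog,
--     )
-- ===== SOURCE B (Python) =====
-- NO_DEPLOY_COMMENT = 'no'
--
--
-- def get_deploy_comment(
--         deploy_comment_format, changelog_records, from_version=None, new_version=None,
--         default_version='<unknown>', default_changelog='<null>'):
--     if deploy_comment_format == NO_DEPLOY_COMMENT:
--         return None
--
--     records = list(changelog_records)
--     if not records:
--         return deploy_comment_format.format(
--             version=default_version, changelog=default_changelog)
--
--     working = records
--     if new_version:
--         i = next((k for k, (v, _) in enumerate(records) if v == new_version), None)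
--         working = records[i:] if i is not None else records[:1]
--
--     relevant = working[:1]
--     if from_version:
--         j = next((k for k, (v, _) in enumerate(working) if k >= 1 and v == from_version), None)
--         if j is not None:
--             relevant = working[:j]
--
--     head_version, head_changelog = relevant[0]
--     parts = [head_changelog] + ['{}:\n{}'.format(v, c) for v, c in relevant[1:]]
--     version = head_version or default_version
--     changelog = '\n\n'.join(parts) or default_changelog
--     return deploy_comment_format.format(version=version, changelog=changelog)
-- ===== Notes on version B (the rewrite author's own statement) =====
-- stated objective: simpler
-- what changed: Replaces A's iterator/pushback pipeline (itertools.chain, next with sentinel, a helper that re-collects records until a version) with one materialized list plus two index finds and slices (records[i:], working[:j]), so the fallback cases become plain slice expressions.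
import Mathlib
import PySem

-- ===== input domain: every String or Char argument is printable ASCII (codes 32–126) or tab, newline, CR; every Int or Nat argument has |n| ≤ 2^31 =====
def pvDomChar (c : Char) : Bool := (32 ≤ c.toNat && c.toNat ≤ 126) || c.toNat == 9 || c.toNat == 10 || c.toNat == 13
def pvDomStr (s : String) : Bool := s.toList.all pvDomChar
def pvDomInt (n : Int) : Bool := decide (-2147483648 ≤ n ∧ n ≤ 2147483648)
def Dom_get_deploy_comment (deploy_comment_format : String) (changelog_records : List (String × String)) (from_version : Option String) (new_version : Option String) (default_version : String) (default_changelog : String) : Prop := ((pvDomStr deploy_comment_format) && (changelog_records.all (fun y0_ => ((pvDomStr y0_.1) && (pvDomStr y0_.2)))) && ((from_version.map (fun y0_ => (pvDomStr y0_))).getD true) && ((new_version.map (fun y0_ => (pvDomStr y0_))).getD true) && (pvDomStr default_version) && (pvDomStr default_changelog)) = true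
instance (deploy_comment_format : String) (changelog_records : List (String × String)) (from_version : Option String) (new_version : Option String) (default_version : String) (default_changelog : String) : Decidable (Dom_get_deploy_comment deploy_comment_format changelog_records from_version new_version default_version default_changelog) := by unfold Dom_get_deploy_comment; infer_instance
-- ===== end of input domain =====

-- B replaces A's iterator/pushback pipeline (itertools.chain, next with sentinel, a helper
-- re-collecting records until a version) with a materialized list, two index finds and slices;
-- objective: simpler. Equivalence is about the return value; neither version mutates its arguments.

-- ===== PORT A =====

-- Shared port of Python `fmt.format(version=…, changelog=…)` (both A and B call str.format):
-- exact for format strings made of literal characters, '{{', '}}', '{version}' and '{changelog}'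
-- (the domain Pre_ admits); `none` where Python raises on such strings (a lone brace).
def pvFormatVC (fmt : List Char) (v c : List Char) : Option (List Char) :=
  match fmt with
  | [] => some []
  | '{' :: '{' :: rest => (pvFormatVC rest v c).map (fun t => '{' :: t)
  | '}' :: '}' :: rest => (pvFormatVC rest v c).map (fun t => '}' :: t)
  | '{' :: rest =>
      if rest.take 8 == "version}".toList then
        (pvFormatVC (rest.drop 8) v c).map (fun t => v ++ t)
      else if rest.take 10 == "changelog}".toList then
        (pvFormatVC (rest.drop 10) v c).map (fun t => c ++ t)
      else none
  | '}' :: _ => none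
  | ch :: rest => (pvFormatVC rest v c).map (fun t => ch :: t)
termination_by fmt.length
decreasing_by all_goals (simp; try omega)

-- port of `_get_changelog_until_version` (the `result` list is the acc parameter)
def pv_until_version (records : List (String × String)) (prev : String)
    (allIfNotFound : Bool) (result : List (String × String)) : List (String × String) :=
  match records with
  | [] => if allIfNotFound then result else []
  | (version, cr) :: rest =>
      if version == prev then result
      else pv_until_version rest prev allIfNotFound (result ++ [(version, cr)])

-- port of A's generator `next((cr for v, cr in records if v == new_version), None)`,
-- also yielding the unconsumed remainder of the iterator (`none` = generator exhausted)
def pv_find_new (records : List (String × String)) (nv : String) :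
    Option (String × List (String × String)) :=
  match records with
  | [] => none
  | (version, cr) :: rest => if version == nv then some (cr, rest) else pv_find_new rest nv

-- port of A's `for idx, (version, changelog_record) in enumerate(relevant_records)` loop
def pv_process (records : List (String × String)) (idx : Nat) : List (String × String) :=
  match records with
  | [] => []
  | (version, cr) :: rest =>
      (version, if 0 < idx then version ++ ":\n" ++ cr else cr) :: pv_process rest (idx + 1)

def get_deploy_comment (deploy_comment_format : String) (changelog_records : List (String × String)) (from_version : Option String) (new_version : Option String) (default_version : String) (default_changelog : String) : Option String :=
  if deploy_comment_format == "no" then none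
  else
    match changelog_records with
    | [] =>
        (pvFormatVC deploy_comment_format.toList default_version.toList default_changelog.toList).map String.ofList
    | top :: restAll =>
      -- `changelog_records = itertools.chain([top_record], changelog_records)`: the stream is the full list again
      let stream : List (String × String) :=
        match new_version with
        | none => top :: restAll
        | some nv =>
          if nv == "" then top :: restAll   -- falsy new_version: branch skipped
          else
            match pv_find_new (top :: restAll) nv with
            | none => [top]                              -- not found: `iter([top_record])`
            | some (cr, rest) => (nv, cr) :: rest        -- found: put `(new_version, cr)` back
      match stream with
      | [] => none   -- unreachable: the stream above is never empty
      | r0 :: rest2 =>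
        let relevant : List (String × String) :=
          match from_version with
          | none => [r0]
          | some fv =>
            if fv == "" then [r0]
            else r0 :: pv_until_version rest2 fv false []
        let processed := pv_process relevant 0
        let version :=
          match processed with
          | [] => default_version                         -- `version = None`; `None or default`
          | (v, _) :: _ => if v == "" then default_version else v
        let changelog0 := PySem.Str.join "\n\n" (processed.map (fun p => p.2))
        let changelog := if changelog0 == "" then default_changelog else changelog0
        (pvFormatVC deploy_comment_format.toList version.toList changelog.toList).map String.ofList

-- ===== PORT B =====
def get_deploy_comment_alt (deploy_comment_format : String) (changelog_records : List (String × String)) (from_version : Option String) (new_version : Option String) (default_version : String) (default_changelog : String) : Option String :=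
  if deploy_comment_format == "no" then none
  else
    match changelog_records with
    | [] =>
        (pvFormatVC deploy_comment_format.toList default_version.toList default_changelog.toList).map String.ofList
    | _ :: _ =>
      let records := changelog_records
      let working :=
        match new_version with
        | none => records
        | some nv =>
          if nv == "" then records
          else
            match records.findIdx? (fun r : String × String => r.1 == nv) with
            | some i => records.drop i      -- records[i:]
            | none => records.take 1        -- records[:1]
      let relevant :=
        match from_version with
        | none => working.take 1
        | some fv =>
          if fv == "" then working.take 1
          else
            match (working.drop 1).findIdx? (fun r : String × String => r.1 == fv) with
            | some k => working.take (k + 1)   -- working[:j], j = k+1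
            | none => working.take 1
      match relevant with
      | [] => none   -- unreachable: working, hence relevant, is never empty
      | (hv, hc) :: tl =>
        let parts := hc :: tl.map (fun r : String × String => r.1 ++ ":\n" ++ r.2)
        let version := if hv == "" then default_version else hv
        let changelog0 := PySem.Str.join "\n\n" parts
        let changelog := if changelog0 == "" then default_changelog else changelog0
        (pvFormatVC deploy_comment_format.toList version.toList changelog.toList).map String.ofList

-- ===== PRECONDITION & SPEC =====
-- Pre_ restricts the format string to text built from literal characters, '{{', '}}',
-- '{version}' and '{changelog}': on other format strings Python's str.format either raises
-- (a lone brace, an unknown field name) or applies format-spec/conversion features of the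
-- format mini-language that the shared port pvFormatVC does not cover.
def pvFmtWF (l : List Char) : Bool :=
  match l with
  | [] => true
  | '{' :: '{' :: rest => pvFmtWF rest
  | '{' :: 'v' :: 'e' :: 'r' :: 's' :: 'i' :: 'o' :: 'n' :: '}' :: rest => pvFmtWF rest
  | '{' :: 'c' :: 'h' :: 'a' :: 'n' :: 'g' :: 'e' :: 'l' :: 'o' :: 'g' :: '}' :: rest => pvFmtWF rest
  | '{' :: _ => false
  | '}' :: '}' :: rest => pvFmtWF rest
  | '}' :: _ => false
  | _ :: rest => pvFmtWF rest

def Pre_get_deploy_comment (deploy_comment_format : String) (changelog_records : List (String × String)) (from_version : Option String) (new_version : Option String) (default_version : String) (default_changelog : String) : Prop :=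
  pvFmtWF deploy_comment_format.toList = true
instance (deploy_comment_format : String) (changelog_records : List (String × String)) (from_version : Option String) (new_version : Option String) (default_version : String) (default_changelog : String) : Decidable (Pre_get_deploy_comment deploy_comment_format changelog_records from_version new_version default_version default_changelog) := by unfold Pre_get_deploy_comment; infer_instance

def pvWitness_get_deploy_comment : String × (List (String × String)) × Option String × Option String × String × String :=
  ("deploying {version}:\n{changelog}", [("2.0", "fix B"), ("1.0", "fix A")], some "1.0", some "2.0", "<unknown>", "<null>")

def Spec_get_deploy_comment (deploy_comment_format : String) (changelog_records : List (String × String)) (from_version : Option String) (new_version : Option String) (default_version : String) (default_changelog : String) (out : Option String) : Prop := out = get_deploy_comment_alt deploy_comment_format changelog_records from_version new_version default_version default_changelog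
instance (deploy_comment_format : String) (changelog_records : List (String × String)) (from_version : Option String) (new_version : Option String) (default_version : String) (default_changelog : String) (out : Option String) : Decidable (Spec_get_deploy_comment deploy_comment_format changelog_records from_version new_version default_version default_changelog out) := by unfold Spec_get_deploy_comment; infer_instance

-- ===== CLAIM (what is proved, stated in full; the proofs are below) =====
def Claim_equal_get_deploy_comment : Prop := ∀ (deploy_comment_format : String) (changelog_records : List (String × String)) (from_version : Option String) (new_version : Option String) (default_version : String) (default_changelog : String), Dom_get_deploy_comment deploy_comment_format changelog_records from_version new_version default_version default_changelog → Pre_get_deploy_comment deploy_comment_format changelog_records from_version new_version default_version default_changelog → Spec_get_deploy_comment deploy_comment_format changelog_records from_version new_version default_version default_changelog (get_deploy_comment deploy_comment_format changelog_records from_version new_version default_version default_changelog)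

-- ===== LEMMAS AND PROOFS =====

-- A's generator exhausts without a match exactly when findIdx? finds nothing
lemma pv_find_new_none (l : List (String × String)) (nv : String)
    (h : l.findIdx? (fun r : String × String => r.1 == nv) = none) : pv_find_new l nv = none := by
  induction l with
  | nil => rfl
  | cons hd tl ih =>
    obtain ⟨v, c⟩ := hd
    by_cases hv : v = nv
    · simp [List.findIdx?_cons, hv] at h
    · simp only [List.findIdx?_cons] at h
      simp only [show ((v, c).1 == nv) = false by simp [hv], Bool.false_eq_true, if_false,
        Option.map_eq_none_iff] at h
      simp [pv_find_new, hv, ih h]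

-- A's "found & put back" stream equals B's records.drop i
lemma pv_find_new_some (l : List (String × String)) (nv : String) :
    ∀ i, l.findIdx? (fun r : String × String => r.1 == nv) = some i →
    (match pv_find_new l nv with
     | none => ([] : List (String × String))
     | some (cr, rest) => (nv, cr) :: rest) = l.drop i ∧ i < l.length := by
  induction l with
  | nil => intro i h; simp at h
  | cons hd tl ih =>
    intro i h
    obtain ⟨v, c⟩ := hd
    by_cases hv : v = nv
    · subst hv
      simp [List.findIdx?_cons] at h
      subst h
      simp [pv_find_new]
    · simp only [List.findIdx?_cons] at h
      simp only [show ((v, c).1 == nv) = false by simp [hv], Bool.false_eq_true, if_false,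
        Option.map_eq_some_iff] at h
      obtain ⟨j, hj, hji⟩ := h
      obtain ⟨h1, h2⟩ := ih j hj
      subst hji
      constructor
      · simpa [pv_find_new, hv] using h1
      · simpa using Nat.succ_lt_succ h2

-- A's until-version collector equals a take at the found index ([] when not found)
lemma pv_until_eq (fv : String) :
    ∀ (l acc : List (String × String)),
    pv_until_version l fv false acc =
      (match l.findIdx? (fun r : String × String => r.1 == fv) with
       | some k => acc ++ l.take k
       | none => ([] : List (String × String))) := by
  intro l
  induction l with
  | nil => intro acc; rfl
  | cons hd tl ih =>
    intro acc
    obtain ⟨v, c⟩ := hd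
    rw [List.findIdx?_cons]
    by_cases hv : ((v, c).1 == fv)
    · simp [pv_until_version, hv]
    · simp only [hv]
      simp only [pv_until_version, hv]
      rw [ih]
      cases htl : tl.findIdx? (fun r : String × String => r.1 == fv) with
      | none => simp
      | some k => simp [List.take_succ_cons]

-- A's enumerate loop at idx ≥ 1 is B's prefixing map
lemma pv_process_pos :
    ∀ (l : List (String × String)) (n : Nat),
    pv_process l (n + 1) = l.map (fun r : String × String => (r.1, r.1 ++ ":\n" ++ r.2)) := by
  intro l
  induction l with
  | nil => intro n; rfl
  | cons hd tl ih =>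
    intro n
    obtain ⟨v, c⟩ := hd
    simp [pv_process, ih]

lemma pv_process_zero (v c : String) (tl : List (String × String)) :
    pv_process ((v, c) :: tl) 0 = (v, c) :: tl.map (fun r : String × String => (r.1, r.1 ++ ":\n" ++ r.2)) := by
  simp [pv_process, pv_process_pos]

-- tail section: given the same nonempty relevant list, A's processing/formatting = B's
lemma pv_tail_eq (fmt dv dc hv hc : String) (tl : List (String × String)) :
    (let processed := pv_process ((hv, hc) :: tl) 0
     let version :=
       match processed with
       | [] => dv
       | (v, _) :: _ => if v == "" then dv else v
     let changelog0 := PySem.Str.join "\n\n" (processed.map (fun p => p.2))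
     let changelog := if changelog0 == "" then dc else changelog0
     (pvFormatVC fmt.toList version.toList changelog.toList).map String.ofList) =
    (let parts := hc :: tl.map (fun r : String × String => r.1 ++ ":\n" ++ r.2)
     let version := if hv == "" then dv else hv
     let changelog0 := PySem.Str.join "\n\n" parts
     let changelog := if changelog0 == "" then dc else changelog0
     (pvFormatVC fmt.toList version.toList changelog.toList).map String.ofList) := by
  simp only [pv_process_zero, List.map_cons, List.map_map]
  rfl

-- proof-only names for the two tails (defeq to the ports' bodies after the stream/working step)
def pvTailA (fmt dv dc : String) (fv : Option String) (W : List (String × String)) : Option String :=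
  match W with
  | [] => none
  | r0 :: rest2 =>
    let relevant : List (String × String) :=
      match fv with
      | none => [r0]
      | some f => if f == "" then [r0] else r0 :: pv_until_version rest2 f false []
    let processed := pv_process relevant 0
    let version :=
      match processed with
      | [] => dv
      | (v, _) :: _ => if v == "" then dv else v
    let changelog0 := PySem.Str.join "\n\n" (processed.map (fun p => p.2))
    let changelog := if changelog0 == "" then dc else changelog0
    (pvFormatVC fmt.toList version.toList changelog.toList).map String.ofList

def pvTailB (fmt dv dc : String) (fv : Option String) (W : List (String × String)) : Option String :=
  let relevant : List (String × String) :=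
    match fv with
    | none => W.take 1
    | some f =>
      if f == "" then W.take 1
      else
        match (W.drop 1).findIdx? (fun r : String × String => r.1 == f) with
        | some k => W.take (k + 1)
        | none => W.take 1
  match relevant with
  | [] => none
  | (hv, hc) :: tl =>
    let parts := hc :: tl.map (fun r : String × String => r.1 ++ ":\n" ++ r.2)
    let version := if hv == "" then dv else hv
    let changelog0 := PySem.Str.join "\n\n" parts
    let changelog := if changelog0 == "" then dc else changelog0
    (pvFormatVC fmt.toList version.toList changelog.toList).map String.ofList

-- middle section: A's (from_version, until-version) selection and tail = B's slice selection and tail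
lemma pv_sel_eq (fmt dv dc : String) (fv : Option String) (r0 : String × String)
    (rest2 : List (String × String)) :
    pvTailA fmt dv dc fv (r0 :: rest2) = pvTailB fmt dv dc fv (r0 :: rest2) := by
  obtain ⟨v0, c0⟩ := r0
  cases fv with
  | none => exact pv_tail_eq fmt dv dc v0 c0 []
  | some f =>
    by_cases hf : f = ""
    · subst hf
      exact pv_tail_eq fmt dv dc v0 c0 []
    · have hf' : (f == "") = false := by simp [hf]
      simp only [pvTailA, pvTailB, hf', Bool.false_eq_true, if_false, List.drop_one,
        List.tail_cons]
      rw [pv_until_eq f rest2 []]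
      cases hidx : rest2.findIdx? (fun r : String × String => r.1 == f) with
      | none =>
        exact pv_tail_eq fmt dv dc v0 c0 []
      | some k =>
        simp only [List.nil_append]
        exact pv_tail_eq fmt dv dc v0 c0 (rest2.take k)

-- ===== VERDICT (by name: the statement is the Claim_ definition above) =====
theorem get_deploy_comment_spec : Claim_equal_get_deploy_comment := by
  intro fmt records fv nv dv dc _ _
  unfold Spec_get_deploy_comment get_deploy_comment get_deploy_comment_alt
  by_cases hno : (fmt == "no")
  · simp [hno]
  · simp only [hno, Bool.false_eq_true, if_false]
    cases records with
    | nil => rfl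
    | cons top restAll =>
      cases nv with
      | none => exact pv_sel_eq fmt dv dc fv top restAll
      | some n =>
        by_cases hn : n = ""
        · subst hn
          exact pv_sel_eq fmt dv dc fv top restAll
        · have hn' : (n == "") = false := by simp [hn]
          simp only [hn', Bool.false_eq_true, if_false]
          cases hidx : (top :: restAll).findIdx? (fun r : String × String => r.1 == n) with
          | none =>
            rw [pv_find_new_none _ _ hidx]
            exact pv_sel_eq fmt dv dc fv top []
          | some i =>
            obtain ⟨h1, h2⟩ := pv_find_new_some (top :: restAll) n i hidx
            cases hfn : pv_find_new (top :: restAll) n with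
            | none =>
              rw [hfn] at h1
              have h1' := h1.symm
              rw [List.drop_eq_nil_iff] at h1'
              omega
            | some p =>
              obtain ⟨cr, rest⟩ := p
              rw [hfn] at h1
              show pvTailA fmt dv dc fv ((n, cr) :: rest) =
                pvTailB fmt dv dc fv ((top :: restAll).drop i)
              rw [← h1]
              exact pv_sel_eq fmt dv dc fv (n, cr) rest
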